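-- pv_equiv track=rewrite | github.com/JMarvi3/practice_problems | wordplay.py | words_containing_all_vowels_in_order
-- ===== SOURCE A (Python) =====
-- def words_containing_all_vowels_in_order(words):
--     vowels = 'AEIOU'
--     results = []
--     for word in words:
--         pos = 0
--         for c in word:
--             if c == vowels[pos]:
--                 pos += 1
--                 if pos == len(vowels):
--                     results.append(word)
--                     break
--     return results
-- ===== SOURCE B (Python) =====
-- def words_containing_all_vowels_in_order(words):
--     # Staged passes: one list-wide filter/trim pass per vowel, carrying
--     # (original word, remaining suffix) pairs; no per-word inner loop.
--     pairs = [(w, w) for w in words]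
--     for v in 'AEIOU':
--         pairs = [(w, rest.partition(v)[2]) for w, rest in pairs if v in rest]
--     return [w for w, _ in pairs]
-- ===== Notes on version B (the rewrite author's own statement) =====
-- stated objective: alternative
-- what changed: B replaces A's per-word character loop with a vowel pointer by five staged list-wide passes: it carries (word, remaining suffix) pairs and, for each vowel in turn, filters the whole list to pairs whose suffix contains that vowel and trims the suffix past its first occurrence, finally projecting the surviving words.
import Mathlib
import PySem

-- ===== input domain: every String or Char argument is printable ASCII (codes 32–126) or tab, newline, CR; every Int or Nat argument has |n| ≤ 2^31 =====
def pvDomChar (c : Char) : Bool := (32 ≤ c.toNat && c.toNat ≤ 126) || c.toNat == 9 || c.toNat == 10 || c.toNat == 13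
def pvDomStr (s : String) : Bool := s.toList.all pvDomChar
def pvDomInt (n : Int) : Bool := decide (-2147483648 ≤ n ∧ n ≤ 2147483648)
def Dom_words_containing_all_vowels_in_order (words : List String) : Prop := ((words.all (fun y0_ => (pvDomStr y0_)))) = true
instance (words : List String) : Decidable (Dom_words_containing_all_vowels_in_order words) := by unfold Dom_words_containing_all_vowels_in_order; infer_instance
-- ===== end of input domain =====

-- B: five staged list-wide filter/trim passes over (word, suffix) pairs instead of A's per-word pointer loop; same cost.

-- ===== PORT A =====
-- A's inner loop: scan the word's chars with a pointer `pos` into 'AEIOU';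
-- on a match advance, and when pos reaches 5 append the word and break.
def pvVowels : List Char := ['A', 'E', 'I', 'O', 'U']

def pvALoop : List Char → Nat → Bool
  | [], _ => false
  | c :: rest, pos =>
    if c = pvVowels.getD pos ' ' then
      if pos + 1 = 5 then true else pvALoop rest (pos + 1)
    else pvALoop rest pos

def words_containing_all_vowels_in_order (words : List String) : List String :=
  words.foldl (fun results word =>
    if pvALoop word.toList 0 then results ++ [word] else results) []

-- ===== PORT B =====
-- `v in rest` + `rest.partition(v)[2]`: the suffix after the first occurrence
-- of v, or none when v is absent (suffixes carried as List Char).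
def pvAfter (v : Char) : List Char → Option (List Char)
  | [] => none
  | c :: rest => if c = v then some rest else pvAfter v rest

-- one stage: `[(w, rest.partition(v)[2]) for w, rest in pairs if v in rest]`
def pvStage (v : Char) (pairs : List (String × List Char)) : List (String × List Char) :=
  pairs.filterMap (fun p => (pvAfter v p.2).map (fun r => (p.1, r)))

def words_containing_all_vowels_in_order_alt (words : List String) : List String :=
  (pvVowels.foldl (fun pairs v => pvStage v pairs)
    (words.map (fun w => (w, w.toList)))).map Prod.fst

-- ===== PRECONDITION & SPEC =====
def Spec_words_containing_all_vowels_in_order (words : List String) (out : List String) : Prop := out = words_containing_all_vowels_in_order_alt words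
instance (words : List String) (out : List String) : Decidable (Spec_words_containing_all_vowels_in_order words out) := by unfold Spec_words_containing_all_vowels_in_order; infer_instance

-- ===== CLAIM (what is proved, stated in full; the proofs are below) =====
def Claim_equal_words_containing_all_vowels_in_order : Prop := ∀ (words : List String), Dom_words_containing_all_vowels_in_order words → Spec_words_containing_all_vowels_in_order words (words_containing_all_vowels_in_order words)

-- ===== LEMMAS AND PROOFS =====

-- subsequence check used only by the proofs, bridging the two ports
def pvCheck : List Char → List Char → Bool
  | [], _ => true
  | v :: vs, cs =>
    match pvAfter v cs with
    | some rest => pvCheck vs rest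
    | none => false

theorem pvCheck_cons_ne (v : Char) (vs : List Char) (c : Char) (cs : List Char)
    (h : ¬ c = v) : pvCheck (v :: vs) (c :: cs) = pvCheck (v :: vs) cs := by
  simp [pvCheck, pvAfter, h]

theorem pvVowels_drop (pos : Nat) (hp : pos < 5) :
    pvVowels.drop pos = pvVowels.getD pos ' ' :: pvVowels.drop (pos + 1) := by
  interval_cases pos <;> rfl

theorem pvLoop_eq_check (cs : List Char) (pos : Nat) (hp : pos < 5) :
    pvALoop cs pos = pvCheck (pvVowels.drop pos) cs := by
  induction cs generalizing pos with
  | nil =>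
    rw [pvVowels_drop pos hp]
    simp [pvALoop, pvCheck, pvAfter]
  | cons c rest ih =>
    rw [pvVowels_drop pos hp]
    by_cases hc : c = pvVowels.getD pos ' '
    · rw [pvALoop, if_pos hc]
      have hcons : pvCheck (pvVowels.getD pos ' ' :: pvVowels.drop (pos + 1)) (c :: rest)
          = pvCheck (pvVowels.drop (pos + 1)) rest := by
        simp [pvCheck, pvAfter, hc]
      rw [hcons]
      by_cases h5 : pos + 1 = 5
      · rw [if_pos h5, h5]
        have : pvVowels.drop 5 = [] := rfl
        rw [this]
        simp [pvCheck]
      · rw [if_neg h5, ih (pos + 1) (by omega)]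
    · rw [pvALoop, if_neg hc, pvCheck_cons_ne _ _ _ _ hc, ih pos hp,
        pvVowels_drop pos hp]

theorem pvFoldl_filter (p : String → Bool) (ws acc : List String) :
    ws.foldl (fun results word => if p word then results ++ [word] else results) acc
      = acc ++ ws.filter p := by
  induction ws generalizing acc with
  | nil => simp
  | cons w ws ih =>
    by_cases hw : p w <;> simp [List.foldl, hw, ih]

theorem pvStage_filter (v : Char) (vs : List Char) (pairs : List (String × List Char)) :
    ((pvStage v pairs).filter (fun p => pvCheck vs p.2)).map Prod.fst
      = (pairs.filter (fun p => pvCheck (v :: vs) p.2)).map Prod.fst := by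
  induction pairs with
  | nil => rfl
  | cons p ps ih =>
    obtain ⟨w, cs⟩ := p
    cases hca : pvAfter v cs with
    | none =>
      have h1 : pvStage v ((w, cs) :: ps) = pvStage v ps := by
        simp [pvStage, hca]
      have h2 : pvCheck (v :: vs) cs = false := by simp [pvCheck, hca]
      simp [h1, ih, h2]
    | some r =>
      have h1 : pvStage v ((w, cs) :: ps) = (w, r) :: pvStage v ps := by
        simp [pvStage, hca]
      have h2 : pvCheck (v :: vs) cs = pvCheck vs r := by simp [pvCheck, hca]
      by_cases hr : pvCheck vs r = true
      · simp [h1, hr, h2, ih]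
      · simp at hr
        simp [h1, hr, h2, ih]

theorem pvStages_eq_filter (vs : List Char) (pairs : List (String × List Char)) :
    ((vs.foldl (fun pairs v => pvStage v pairs) pairs).map Prod.fst)
      = (pairs.filter (fun p => pvCheck vs p.2)).map Prod.fst := by
  induction vs generalizing pairs with
  | nil => simp [pvCheck]
  | cons v vs ih =>
    rw [List.foldl_cons, ih, pvStage_filter]

theorem pvFilter_map_pairs (ws : List String) :
    ((ws.map (fun w => (w, w.toList))).filter (fun p => pvCheck pvVowels p.2)).map Prod.fst
      = ws.filter (fun w => pvCheck pvVowels w.toList) := by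
  induction ws with
  | nil => rfl
  | cons w ws ih =>
    by_cases hw : pvCheck pvVowels w.toList = true
    · simp [hw, ih]
    · simp at hw
      simp [hw, ih]

-- ===== VERDICT (by name: the statement is the Claim_ definition above) =====
theorem words_containing_all_vowels_in_order_spec : Claim_equal_words_containing_all_vowels_in_order := by
  intro words _
  unfold Spec_words_containing_all_vowels_in_order
  unfold words_containing_all_vowels_in_order words_containing_all_vowels_in_order_alt
  rw [pvFoldl_filter, pvStages_eq_filter, pvFilter_map_pairs]
  simp only [List.nil_append]
  congr 1
  funext w
  simpa using pvLoop_eq_check w.toList 0 (by omega)
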